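-- pv_equiv track=rewrite | github.com/PuercoPop/advent-of-code | 2015/15.py | mix_score
-- ===== SOURCE A (Python) =====
-- def mix_score(mix, datasheet):
--     props=['flavor', 'capacity', 'texture', 'durability']
--     score=1
--     for prop in props:
--         sum=0
--         for ingredient, quantity in mix.items():
--             sum+=datasheet[ingredient][prop]*quantity
--         score*=max(0, sum)
--     return score
-- ===== SOURCE B (Python) =====
-- def mix_score(mix, datasheet):
--     # One pass over the mix: accumulate all four property sums at once,
--     # looking each ingredient's datasheet entry up only once.
--     flavor = capacity = texture = durability = 0
--     for ingredient, quantity in mix.items():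
--         sheet = datasheet[ingredient]
--         flavor += sheet['flavor'] * quantity
--         capacity += sheet['capacity'] * quantity
--         texture += sheet['texture'] * quantity
--         durability += sheet['durability'] * quantity
--     return max(0, flavor) * (max(0, capacity) * (max(0, texture) * max(0, durability)))
-- ===== Notes on version B (the rewrite author's own statement) =====
-- stated objective: alternative
-- what changed: Instead of scanning the mix once per property (four passes, four datasheet lookups per ingredient), B makes a single pass over the mix accumulating all four property sums at once, looking each ingredient's sheet up only once, then multiplies the clamped sums.
import Mathlib
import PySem

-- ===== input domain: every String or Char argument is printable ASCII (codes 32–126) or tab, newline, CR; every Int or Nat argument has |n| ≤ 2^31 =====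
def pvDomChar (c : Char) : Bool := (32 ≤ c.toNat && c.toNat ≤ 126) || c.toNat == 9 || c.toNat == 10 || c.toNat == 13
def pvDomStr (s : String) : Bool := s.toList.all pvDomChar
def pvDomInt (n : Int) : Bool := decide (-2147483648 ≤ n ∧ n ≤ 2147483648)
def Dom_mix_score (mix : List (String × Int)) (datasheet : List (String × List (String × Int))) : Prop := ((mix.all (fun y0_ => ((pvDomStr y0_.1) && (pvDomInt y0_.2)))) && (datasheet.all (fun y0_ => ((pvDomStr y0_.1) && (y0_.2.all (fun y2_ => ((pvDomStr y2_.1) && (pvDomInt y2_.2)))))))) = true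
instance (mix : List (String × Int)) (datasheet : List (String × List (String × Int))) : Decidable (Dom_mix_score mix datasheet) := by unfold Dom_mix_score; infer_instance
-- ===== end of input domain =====

-- B replaces A's four passes over the mix (one per property) by a single pass that
-- accumulates all four property sums at once; same return value on Pre_.

-- ===== PORT A =====
-- A: for each of the four props, scan mix.items() summing datasheet[ingredient][prop]*quantity,
-- multiply the clamped sums into score.  Lookups use getD; Pre_ guarantees the keys exist
-- (Python raises KeyError exactly where they do not).
def mix_score (mix : List (String × Int)) (datasheet : List (String × List (String × Int))) : Int :=
  (["flavor", "capacity", "texture", "durability"]).foldl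
    (fun score prop =>
      score * max 0 ((PySem.Dict.ofList mix).items.foldl
        (fun s iq =>
          s + (PySem.Dict.ofList ((PySem.Dict.ofList datasheet).getD iq.1 [])).getD prop 0 * iq.2)
        0))
    1

-- ===== PORT B =====
-- B: single pass over mix.items(); one quadruple of running sums; sheet looked up once.
def mix_score_alt (mix : List (String × Int)) (datasheet : List (String × List (String × Int))) : Int :=
  let s := (PySem.Dict.ofList mix).items.foldl
    (fun (acc : Int × Int × Int × Int) iq =>
      let sheet := PySem.Dict.ofList ((PySem.Dict.ofList datasheet).getD iq.1 [])
      (acc.1 + sheet.getD "flavor" 0 * iq.2,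
       acc.2.1 + sheet.getD "capacity" 0 * iq.2,
       acc.2.2.1 + sheet.getD "texture" 0 * iq.2,
       acc.2.2.2 + sheet.getD "durability" 0 * iq.2))
    (0, 0, 0, 0)
  max 0 s.1 * (max 0 s.2.1 * (max 0 s.2.2.1 * max 0 s.2.2.2))

-- ===== PRECONDITION & SPEC =====
-- Pre_ admits exactly the inputs where Python A returns: every ingredient of the mix has a
-- datasheet entry and that entry has all four properties (otherwise A raises KeyError).
def Pre_mix_score (mix : List (String × Int)) (datasheet : List (String × List (String × Int))) : Prop :=
  ∀ p ∈ mix,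
    (PySem.Dict.ofList datasheet).contains p.1 = true ∧
    ∀ prop ∈ (["flavor", "capacity", "texture", "durability"] : List String),
      (PySem.Dict.ofList ((PySem.Dict.ofList datasheet).getD p.1 [])).contains prop = true
instance (mix : List (String × Int)) (datasheet : List (String × List (String × Int))) : Decidable (Pre_mix_score mix datasheet) := by unfold Pre_mix_score; infer_instance

def pvWitness_mix_score : (List (String × Int)) × (List (String × List (String × Int))) :=
  ([("butter", 2), ("sugar", 3)],
   [("butter", [("flavor", 1), ("capacity", -1), ("texture", 2), ("durability", 3)]),
    ("sugar", [("flavor", 2), ("capacity", 3), ("texture", -1), ("durability", 1)])])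

def Spec_mix_score (mix : List (String × Int)) (datasheet : List (String × List (String × Int))) (out : Int) : Prop := out = mix_score_alt mix datasheet
instance (mix : List (String × Int)) (datasheet : List (String × List (String × Int))) (out : Int) : Decidable (Spec_mix_score mix datasheet out) := by unfold Spec_mix_score; infer_instance

-- ===== CLAIM (what is proved, stated in full; the proofs are below) =====
def Claim_equal_mix_score : Prop := ∀ (mix : List (String × Int)) (datasheet : List (String × List (String × Int))), Dom_mix_score mix datasheet → Pre_mix_score mix datasheet → Spec_mix_score mix datasheet (mix_score mix datasheet)

-- ===== LEMMAS AND PROOFS =====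

-- B's quadruple fold computes, in each component, the same per-property sum A's four passes compute.
theorem pvQuadFold (look : String → String → Int) (l : List (String × Int)) (acc : Int × Int × Int × Int) :
    l.foldl
      (fun (acc : Int × Int × Int × Int) iq =>
        (acc.1 + look iq.1 "flavor" * iq.2,
         acc.2.1 + look iq.1 "capacity" * iq.2,
         acc.2.2.1 + look iq.1 "texture" * iq.2,
         acc.2.2.2 + look iq.1 "durability" * iq.2))
      acc
    = (acc.1 + (l.map (fun iq => look iq.1 "flavor" * iq.2)).sum,
       acc.2.1 + (l.map (fun iq => look iq.1 "capacity" * iq.2)).sum,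
       acc.2.2.1 + (l.map (fun iq => look iq.1 "texture" * iq.2)).sum,
       acc.2.2.2 + (l.map (fun iq => look iq.1 "durability" * iq.2)).sum) := by
  induction l generalizing acc with
  | nil => simp
  | cons x t ih =>
      simp only [List.foldl_cons, List.map_cons, List.sum_cons, ih]
      refine Prod.ext ?_ (Prod.ext ?_ (Prod.ext ?_ ?_)) <;> simp <;> ring

-- ===== VERDICT (by name: the statement is the Claim_ definition above) =====
theorem mix_score_spec : Claim_equal_mix_score := by
  intro mix datasheet _ _
  unfold Spec_mix_score mix_score mix_score_alt
  rw [pvQuadFold (fun ing prop =>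
        (PySem.Dict.ofList ((PySem.Dict.ofList datasheet).getD ing [])).getD prop 0)]
  simp only [List.foldl_cons, List.foldl_nil,
    PySem.List.foldl_add
      (g := fun iq : String × Int =>
        (PySem.Dict.ofList ((PySem.Dict.ofList datasheet).getD iq.1 [])).getD "flavor" 0 * iq.2)]
  simp [PySem.List.foldl_add]
  ring
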